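-- pv_equiv track=rewrite | github.com/apache/tvm | test_binary_search_simple.py | binary_search_test
-- ===== SOURCE A (Python) =====
-- def binary_search_test(scores, score_threshold):
--     """Test binary search logic for score threshold"""
--     num_boxes = len(scores)
--     lo = 0
--     hi = num_boxes
--
--     while lo < hi:
--         mid = (lo + hi) // 2
--         if scores[mid] > score_threshold:
--             lo = mid + 1
--         else:
--             hi = mid
--
--     return lo
-- ===== SOURCE B (Python) =====
-- def binary_search_test(scores, score_threshold):
--     """Test binary search logic for score threshold (lower_bound style: first/count)"""
--     def search(first, count):
--         if count == 0:
--             return first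
--         half = count // 2
--         if scores[first + half] > score_threshold:
--             return search(first + half + 1, count - half - 1)
--         return search(first, half)
--     return search(0, len(scores))
-- ===== Notes on version B (the rewrite author's own statement) =====
-- stated objective: alternative
-- what changed: Replaces the iterative lo/hi while-loop with a recursive C++ lower_bound-style helper that tracks a start index and a remaining count (first, count) instead of two bounds.
import Mathlib
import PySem

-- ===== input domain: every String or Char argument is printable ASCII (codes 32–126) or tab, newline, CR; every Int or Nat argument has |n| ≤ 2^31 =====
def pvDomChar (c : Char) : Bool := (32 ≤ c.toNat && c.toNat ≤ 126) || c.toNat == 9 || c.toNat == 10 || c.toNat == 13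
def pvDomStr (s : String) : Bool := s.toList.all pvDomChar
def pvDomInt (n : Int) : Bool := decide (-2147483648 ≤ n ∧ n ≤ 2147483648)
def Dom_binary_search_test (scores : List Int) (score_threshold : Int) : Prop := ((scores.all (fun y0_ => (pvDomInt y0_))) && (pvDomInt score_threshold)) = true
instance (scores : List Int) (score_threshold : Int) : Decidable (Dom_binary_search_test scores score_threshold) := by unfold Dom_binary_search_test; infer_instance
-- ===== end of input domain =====

-- B replaces A's iterative lo/hi while-loop with a recursive lower_bound-style helper over (first, count); same results, same cost (objective: alternative).


-- ===== PORT A =====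
-- while lo < hi: mid = (lo+hi)//2; if scores[mid] > t: lo = mid+1 else: hi = mid
-- scores[mid] is always in range (0 ≤ lo ≤ mid < hi ≤ len) on the reachable states, so Python never raises; the .getD 0 default is unreachable there.
def pvLoopA (scores : List Int) (score_threshold : Int) (lo hi : Int) : Int :=
  if h : lo < hi then
    let mid := PySem.Int.floordiv (lo + hi) 2
    if (PySem.List.pyGet? scores mid).getD 0 > score_threshold then
      pvLoopA scores score_threshold (mid + 1) hi
    else
      pvLoopA scores score_threshold lo mid
  else
    lo
termination_by (hi - lo).toNat
decreasing_by
  · have h2 : PySem.Int.floordiv (lo + hi) 2 < hi := by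
      rw [PySem.Int.floordiv_lt_iff_lt_mul (by omega : (0:Int) < 2)]; omega
    have h1 := PySem.Int.floordiv_two_mid_bounds (le_of_lt h)
    omega
  · have h2 : PySem.Int.floordiv (lo + hi) 2 < hi := by
      rw [PySem.Int.floordiv_lt_iff_lt_mul (by omega : (0:Int) < 2)]; omega
    have h1 := PySem.Int.floordiv_two_mid_bounds (le_of_lt h)
    omega

def binary_search_test (scores : List Int) (score_threshold : Int) : Int :=
  pvLoopA scores score_threshold 0 (scores.length : Int)

-- ===== PORT B =====
-- lower_bound-style recursion on (first, count); scores[first + half] is always in range for the reachable states.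
def pvSearchB (scores : List Int) (score_threshold : Int) (first count : Nat) : Int :=
  if count = 0 then (first : Int)
  else
    let half := count / 2
    if (PySem.List.pyGet? scores ((first : Int) + (half : Int))).getD 0 > score_threshold then
      pvSearchB scores score_threshold (first + half + 1) (count - half - 1)
    else
      pvSearchB scores score_threshold first half
termination_by count
decreasing_by all_goals omega

def binary_search_test_alt (scores : List Int) (score_threshold : Int) : Int :=
  pvSearchB scores score_threshold 0 scores.length

-- ===== PRECONDITION & SPEC =====
def Spec_binary_search_test (scores : List Int) (score_threshold : Int) (out : Int) : Prop := out = binary_search_test_alt scores score_threshold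
instance (scores : List Int) (score_threshold : Int) (out : Int) : Decidable (Spec_binary_search_test scores score_threshold out) := by unfold Spec_binary_search_test; infer_instance

-- ===== CLAIM (what is proved, stated in full; the proofs are below) =====
def Claim_equal_binary_search_test : Prop := ∀ (scores : List Int) (score_threshold : Int), Dom_binary_search_test scores score_threshold → Spec_binary_search_test scores score_threshold (binary_search_test scores score_threshold)

-- ===== LEMMAS AND PROOFS =====

-- Invariant: A's loop started at (first, first+count) computes B's search on (first, count).
theorem pvLoopA_eq_pvSearchB (scores : List Int) (score_threshold : Int) (count : Nat) :
    ∀ first : Nat, pvLoopA scores score_threshold (first : Int) ((first : Int) + (count : Int))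
      = pvSearchB scores score_threshold first count := by
  induction count using Nat.strong_induction_on with
  | _ count ih =>
    intro first
    rw [pvLoopA, pvSearchB]
    by_cases hc : count = 0
    · subst hc
      simp
    · have hlt : (first : Int) < (first : Int) + (count : Int) := by omega
      have hmid : PySem.Int.floordiv ((first : Int) + ((first : Int) + (count : Int))) 2
          = (first : Int) + ((count / 2 : Nat) : Int) := by
        rw [PySem.Int.floordiv_eq_ediv_of_pos (by omega : (0:Int) < 2)]
        omega
      simp only [dif_pos hlt, if_neg hc, hmid]
      have e1 : (first : Int) + ((count / 2 : Nat) : Int) + 1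
          = ((first + count / 2 + 1 : Nat) : Int) := by omega
      have e2 : (first : Int) + (count : Int)
          = ((first + count / 2 + 1 : Nat) : Int) + ((count - count / 2 - 1 : Nat) : Int) := by
        omega
      split
      · rw [e1, e2, ih (count - count / 2 - 1) (by omega)]
      · rw [ih (count / 2) (by omega)]

-- ===== VERDICT (by name: the statement is the Claim_ definition above) =====
theorem binary_search_test_spec : Claim_equal_binary_search_test := by
  intro scores score_threshold _
  unfold Spec_binary_search_test binary_search_test binary_search_test_alt
  have := pvLoopA_eq_pvSearchB scores score_threshold scores.length 0
  simpa using this
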